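-- pv_equiv track=rewrite | github.com/liujinbf/gjs | macro_news_feed.py | _build_bias_summary_text
-- ===== SOURCE A (Python) =====
-- USD_HAWKISH_KEYWORDS = {
--     "hawkish",
--     "rate hike",
--     "higher for longer",
--     "sticky inflation",
--     "hot inflation",
--     "strong payroll",
--     "strong labor",
--     "higher yield",
--     "yields rise",
--     "stronger dollar",
-- }
--
-- USD_DOVISH_KEYWORDS = {
--     "dovish",
--     "rate cut",
--     "easing",
--     "cooling inflation",
--     "soft inflation",
--     "weak payroll",
--     "weak labor",
--     "lower yield",
--     "yields fall",
--     "weaker dollar",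
-- }
--
-- ECB_HAWKISH_KEYWORDS = {
--     "ecb hawkish",
--     "lagarde hawkish",
--     "rate hike",
--     "policy tightening",
--     "higher rates",
--     "inflation remains in focus",
--     "inflation still in focus",
--     "inflation remains the focus",
-- }
--
-- ECB_DOVISH_KEYWORDS = {"ecb dovish", "lagarde dovish", "rate cut", "policy easing", "lower rates"}
--
-- BOJ_HAWKISH_KEYWORDS = {"boj hawkish", "ueda hawkish", "tightening", "yield hike", "higher rates", "yen stronger"}
--
-- BOJ_DOVISH_KEYWORDS = {"boj dovish", "ueda dovish", "policy easing", "more stimulus", "yen weaker"}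
--
-- def _normalize_text(value: object) -> str:
--     return " ".join(str(value or "").replace("\n", " ").split()).strip()
--
-- def _text_contains_any(text: str, keywords: set[str]) -> bool:
--     return any(keyword in text for keyword in keywords)
--
-- def _infer_symbol_news_bias(symbol: str, title: str, summary: str, source: str) -> str:
--     symbol_key = str(symbol or "").strip().upper()
--     text = f"{_normalize_text(title)} {_normalize_text(summary)} {_normalize_text(source)}".lower()
--
--     if symbol_key in {"XAUUSD", "XAGUSD"}:
--         if _text_contains_any(text, USD_HAWKISH_KEYWORDS):
--             return "bearish"
--         if _text_contains_any(text, USD_DOVISH_KEYWORDS):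
--             return "bullish"
--     elif symbol_key == "EURUSD":
--         if _text_contains_any(text, ECB_HAWKISH_KEYWORDS):
--             return "bullish"
--         if _text_contains_any(text, ECB_DOVISH_KEYWORDS):
--             return "bearish"
--         if _text_contains_any(text, USD_HAWKISH_KEYWORDS):
--             return "bearish"
--         if _text_contains_any(text, USD_DOVISH_KEYWORDS):
--             return "bullish"
--     elif symbol_key == "USDJPY":
--         if _text_contains_any(text, BOJ_HAWKISH_KEYWORDS):
--             return "bearish"
--         if _text_contains_any(text, BOJ_DOVISH_KEYWORDS):
--             return "bullish"
--         if _text_contains_any(text, USD_HAWKISH_KEYWORDS):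
--             return "bullish"
--         if _text_contains_any(text, USD_DOVISH_KEYWORDS):
--             return "bearish"
--     return "neutral"
--
-- def _build_bias_summary_text(symbols: list[str], title: str, summary: str, source: str) -> tuple[dict[str, str], str]:
--     bias_by_symbol = {}
--     summaries = []
--     for symbol in list(symbols or []):
--         bias = _infer_symbol_news_bias(symbol, title, summary, source)
--         if bias not in {"bullish", "bearish"}:
--             continue
--         bias_by_symbol[str(symbol).strip().upper()] = bias
--         bias_text = "偏多" if bias == "bullish" else "偏空"
--         summaries.append(f"{str(symbol).strip().upper()} {bias_text}")
--     return bias_by_symbol, "；".join(summaries)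
-- ===== SOURCE B (Python) =====
-- USD_HAWKISH_KEYWORDS = {
--     "hawkish",
--     "rate hike",
--     "higher for longer",
--     "sticky inflation",
--     "hot inflation",
--     "strong payroll",
--     "strong labor",
--     "higher yield",
--     "yields rise",
--     "stronger dollar",
-- }
--
-- USD_DOVISH_KEYWORDS = {
--     "dovish",
--     "rate cut",
--     "easing",
--     "cooling inflation",
--     "soft inflation",
--     "weak payroll",
--     "weak labor",
--     "lower yield",
--     "yields fall",
--     "weaker dollar",
-- }
--
-- ECB_HAWKISH_KEYWORDS = {
--     "ecb hawkish",
--     "lagarde hawkish",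
--     "rate hike",
--     "policy tightening",
--     "higher rates",
--     "inflation remains in focus",
--     "inflation still in focus",
--     "inflation remains the focus",
-- }
--
-- ECB_DOVISH_KEYWORDS = {"ecb dovish", "lagarde dovish", "rate cut", "policy easing", "lower rates"}
--
-- BOJ_HAWKISH_KEYWORDS = {"boj hawkish", "ueda hawkish", "tightening", "yield hike", "higher rates", "yen stronger"}
--
-- BOJ_DOVISH_KEYWORDS = {"boj dovish", "ueda dovish", "policy easing", "more stimulus", "yen weaker"}
--
--
-- def _normalize_text(value: object) -> str:
--     return " ".join(str(value or "").replace("\n", " ").split()).strip()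
--
--
-- def _text_contains_any(text, keywords):
--     return any(keyword in text for keyword in keywords)
--
--
-- def _bias_table(title, summary, source):
--     # scan the normalized text once per keyword set, derive one bias per symbol class
--     text = f"{_normalize_text(title)} {_normalize_text(summary)} {_normalize_text(source)}".lower()
--     usd_h = _text_contains_any(text, USD_HAWKISH_KEYWORDS)
--     usd_d = _text_contains_any(text, USD_DOVISH_KEYWORDS)
--     ecb_h = _text_contains_any(text, ECB_HAWKISH_KEYWORDS)
--     ecb_d = _text_contains_any(text, ECB_DOVISH_KEYWORDS)
--     boj_h = _text_contains_any(text, BOJ_HAWKISH_KEYWORDS)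
--     boj_d = _text_contains_any(text, BOJ_DOVISH_KEYWORDS)
--     metal_bias = "bearish" if usd_h else ("bullish" if usd_d else None)
--     eur_bias = ("bullish" if ecb_h else "bearish" if ecb_d else
--                 "bearish" if usd_h else "bullish" if usd_d else None)
--     jpy_bias = ("bearish" if boj_h else "bullish" if boj_d else
--                 "bullish" if usd_h else "bearish" if usd_d else None)
--     return {"XAUUSD": metal_bias, "XAGUSD": metal_bias,
--             "EURUSD": eur_bias, "USDJPY": jpy_bias}
--
--
-- def _build_bias_summary_text(symbols, title, summary, source):
--     # The per-symbol loop is a plain table lookup instead of re-scanning the text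
--     # for every symbol.
--     table = _bias_table(title, summary, source)
--     bias_by_symbol = {}
--     parts = []
--     for symbol in symbols or []:
--         key = str(symbol).strip().upper()
--         bias = table.get(key)
--         if bias is None:
--             continue
--         bias_by_symbol[key] = bias
--         parts.append(f"{key} {'偏多' if bias == 'bullish' else '偏空'}")
--     return bias_by_symbol, "；".join(parts)
-- ===== Notes on version B (the rewrite author's own statement) =====
-- stated objective: faster
-- what changed: B normalizes the news text and scans each keyword set once, precomputing one bias per symbol class into a lookup table, so the per-symbol loop is a single dict lookup instead of re-normalizing and re-scanning the text for every symbol.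
import Mathlib
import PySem

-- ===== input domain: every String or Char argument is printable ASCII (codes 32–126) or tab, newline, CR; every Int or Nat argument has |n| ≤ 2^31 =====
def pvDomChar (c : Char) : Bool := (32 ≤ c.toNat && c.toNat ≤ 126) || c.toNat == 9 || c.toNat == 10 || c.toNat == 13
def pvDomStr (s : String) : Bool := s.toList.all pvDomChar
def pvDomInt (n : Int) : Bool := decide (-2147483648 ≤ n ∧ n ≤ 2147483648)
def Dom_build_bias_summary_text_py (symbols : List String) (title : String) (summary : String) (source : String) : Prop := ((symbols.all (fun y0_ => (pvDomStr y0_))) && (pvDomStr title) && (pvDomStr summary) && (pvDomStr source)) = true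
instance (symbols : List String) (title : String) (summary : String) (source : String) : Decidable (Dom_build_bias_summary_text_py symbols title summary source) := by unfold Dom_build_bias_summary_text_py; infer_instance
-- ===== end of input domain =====

-- B normalizes the text and scans each keyword set once, deriving one bias per symbol
-- class, so the per-symbol loop is a table lookup (objective: faster; same return value).

-- ===== PORT A =====
def USD_HAWKISH_KEYWORDS : List String :=
  ["hawkish", "rate hike", "higher for longer", "sticky inflation", "hot inflation",
   "strong payroll", "strong labor", "higher yield", "yields rise", "stronger dollar"]

def USD_DOVISH_KEYWORDS : List String :=
  ["dovish", "rate cut", "easing", "cooling inflation", "soft inflation",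
   "weak payroll", "weak labor", "lower yield", "yields fall", "weaker dollar"]

def ECB_HAWKISH_KEYWORDS : List String :=
  ["ecb hawkish", "lagarde hawkish", "rate hike", "policy tightening", "higher rates",
   "inflation remains in focus", "inflation still in focus", "inflation remains the focus"]

def ECB_DOVISH_KEYWORDS : List String :=
  ["ecb dovish", "lagarde dovish", "rate cut", "policy easing", "lower rates"]

def BOJ_HAWKISH_KEYWORDS : List String :=
  ["boj hawkish", "ueda hawkish", "tightening", "yield hike", "higher rates", "yen stronger"]

def BOJ_DOVISH_KEYWORDS : List String :=
  ["boj dovish", "ueda dovish", "policy easing", "more stimulus", "yen weaker"]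

-- _normalize_text (identical helper in Source A and Source B; 'value or ""' is the identity on str)
def pvNormalizeText (value : String) : String :=
  PySem.Str.strip (PySem.Str.join " " (PySem.Str.split₀ (PySem.Str.replace value "\n" " ")))

-- the f-string both pythons build: f"{norm(title)} {norm(summary)} {norm(source)}".lower()
def pvNewsText (title : String) (summary : String) (source : String) : String :=
  PySem.Str.lower (pvNormalizeText title ++ " " ++ pvNormalizeText summary ++ " " ++ pvNormalizeText source)

-- _text_contains_any (in both Source A and Source B; any over a set of keywords: order-independent boolean)
def pvContainsAny (text : String) (keywords : List String) : Bool :=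
  keywords.any (fun keyword => PySem.Str.isIn keyword text)

-- _infer_symbol_news_bias
def pvInferSymbolNewsBias (symbol : String) (title : String) (summary : String) (source : String) : String :=
  let symbolKey := PySem.Str.upper (PySem.Str.strip symbol)
  let text := pvNewsText title summary source
  if symbolKey = "XAUUSD" ∨ symbolKey = "XAGUSD" then
    if pvContainsAny text USD_HAWKISH_KEYWORDS then "bearish"
    else if pvContainsAny text USD_DOVISH_KEYWORDS then "bullish"
    else "neutral"
  else if symbolKey = "EURUSD" then
    if pvContainsAny text ECB_HAWKISH_KEYWORDS then "bullish"
    else if pvContainsAny text ECB_DOVISH_KEYWORDS then "bearish"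
    else if pvContainsAny text USD_HAWKISH_KEYWORDS then "bearish"
    else if pvContainsAny text USD_DOVISH_KEYWORDS then "bullish"
    else "neutral"
  else if symbolKey = "USDJPY" then
    if pvContainsAny text BOJ_HAWKISH_KEYWORDS then "bearish"
    else if pvContainsAny text BOJ_DOVISH_KEYWORDS then "bullish"
    else if pvContainsAny text USD_HAWKISH_KEYWORDS then "bullish"
    else if pvContainsAny text USD_DOVISH_KEYWORDS then "bearish"
    else "neutral"
  else "neutral"

-- the body of A's per-symbol loop
def pvStepA (title : String) (summary : String) (source : String)
    (acc : PySem.Dict String String × List String) (symbol : String) :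
    PySem.Dict String String × List String :=
  let bias := pvInferSymbolNewsBias symbol title summary source
  if bias = "bullish" ∨ bias = "bearish" then
    let key := PySem.Str.upper (PySem.Str.strip symbol)
    (acc.1.insert key bias,
     acc.2 ++ [key ++ " " ++ (if bias = "bullish" then "偏多" else "偏空")])
  else acc

def build_bias_summary_text_py (symbols : List String) (title : String) (summary : String) (source : String) : (List (String × String)) × String :=
  let r := symbols.foldl (pvStepA title summary source) (PySem.Dict.empty, [])
  (r.1.items, PySem.Str.join "；" r.2)

-- ===== PORT B =====
-- _bias_table
def pvBiasTable (title : String) (summary : String) (source : String) : PySem.Dict String (Option String) :=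
  let text := pvNewsText title summary source
  let usdH := pvContainsAny text USD_HAWKISH_KEYWORDS
  let usdD := pvContainsAny text USD_DOVISH_KEYWORDS
  let ecbH := pvContainsAny text ECB_HAWKISH_KEYWORDS
  let ecbD := pvContainsAny text ECB_DOVISH_KEYWORDS
  let bojH := pvContainsAny text BOJ_HAWKISH_KEYWORDS
  let bojD := pvContainsAny text BOJ_DOVISH_KEYWORDS
  let metalBias : Option String := if usdH then some "bearish" else if usdD then some "bullish" else none
  let eurBias : Option String :=
    if ecbH then some "bullish" else if ecbD then some "bearish"
    else if usdH then some "bearish" else if usdD then some "bullish" else none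
  let jpyBias : Option String :=
    if bojH then some "bearish" else if bojD then some "bullish"
    else if usdH then some "bullish" else if usdD then some "bearish" else none
  PySem.Dict.ofList [("XAUUSD", metalBias), ("XAGUSD", metalBias), ("EURUSD", eurBias), ("USDJPY", jpyBias)]

-- the body of B's per-symbol loop: one table lookup
def pvStepB (table : PySem.Dict String (Option String))
    (acc : PySem.Dict String String × List String) (symbol : String) :
    PySem.Dict String String × List String :=
  let key := PySem.Str.upper (PySem.Str.strip symbol)
  match table.getD key none with
  | none => acc
  | some bias =>
    (acc.1.insert key bias,
     acc.2 ++ [key ++ " " ++ (if bias = "bullish" then "偏多" else "偏空")])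

def build_bias_summary_text_py_alt (symbols : List String) (title : String) (summary : String) (source : String) : (List (String × String)) × String :=
  let table := pvBiasTable title summary source
  let r := symbols.foldl (pvStepB table) (PySem.Dict.empty, [])
  (r.1.items, PySem.Str.join "；" r.2)

-- ===== PRECONDITION & SPEC =====
def Spec_build_bias_summary_text_py (symbols : List String) (title : String) (summary : String) (source : String) (out : (List (String × String)) × String) : Prop := out = build_bias_summary_text_py_alt symbols title summary source
instance (symbols : List String) (title : String) (summary : String) (source : String) (out : (List (String × String)) × String) : Decidable (Spec_build_bias_summary_text_py symbols title summary source out) := by unfold Spec_build_bias_summary_text_py; infer_instance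

-- ===== CLAIM (what is proved, stated in full; the proofs are below) =====
def Claim_equal_build_bias_summary_text_py : Prop := ∀ (symbols : List String) (title : String) (summary : String) (source : String), Dom_build_bias_summary_text_py symbols title summary source → Spec_build_bias_summary_text_py symbols title summary source (build_bias_summary_text_py symbols title summary source)

-- ===== LEMMAS AND PROOFS =====
-- looking an arbitrary key up in B's literal table
theorem pvTable_getD (m e j : Option String) (k : String) :
    (PySem.Dict.ofList [("XAUUSD", m), ("XAGUSD", m), ("EURUSD", e), ("USDJPY", j)]).getD k none
    = (if k = "XAUUSD" ∨ k = "XAGUSD" then m else if k = "EURUSD" then e else if k = "USDJPY" then j else none) := by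
  simp only [PySem.Dict.ofList, PySem.Dict.update, List.foldl, PySem.Dict.getD_insert,
    PySem.Dict.getD_empty]
  split_ifs <;> first | rfl | (subst_vars; simp_all)

-- A's loop body and B's loop body agree on every symbol and accumulator
theorem pvStep_eq (title : String) (summary : String) (source : String)
    (acc : PySem.Dict String String × List String) (symbol : String) :
    pvStepA title summary source acc symbol
      = pvStepB (pvBiasTable title summary source) acc symbol := by
  unfold pvStepA pvStepB pvBiasTable pvInferSymbolNewsBias
  dsimp only []
  rw [pvTable_getD]
  generalize PySem.Str.upper (PySem.Str.strip symbol) = key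
  generalize pvContainsAny (pvNewsText title summary source) USD_HAWKISH_KEYWORDS = uH
  generalize pvContainsAny (pvNewsText title summary source) USD_DOVISH_KEYWORDS = uD
  generalize pvContainsAny (pvNewsText title summary source) ECB_HAWKISH_KEYWORDS = eH
  generalize pvContainsAny (pvNewsText title summary source) ECB_DOVISH_KEYWORDS = eD
  generalize pvContainsAny (pvNewsText title summary source) BOJ_HAWKISH_KEYWORDS = bH
  generalize pvContainsAny (pvNewsText title summary source) BOJ_DOVISH_KEYWORDS = bD
  by_cases h1 : key = "XAUUSD" ∨ key = "XAGUSD" <;> by_cases h2 : key = "EURUSD" <;> by_cases h3 : key = "USDJPY" <;>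
    cases uH <;> cases uD <;> cases eH <;> cases eD <;> cases bH <;> cases bD <;>
    simp_all

-- ===== VERDICT (by name: the statement is the Claim_ definition above) =====
theorem build_bias_summary_text_py_spec : Claim_equal_build_bias_summary_text_py := by
  intro symbols title summary source _
  unfold Spec_build_bias_summary_text_py
  unfold build_bias_summary_text_py build_bias_summary_text_py_alt
  have h : pvStepA title summary source = pvStepB (pvBiasTable title summary source) :=
    funext fun acc => funext fun symbol => pvStep_eq title summary source acc symbol
  rw [h]
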